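-- pv_equiv track=rewrite | github.com/crAyCoding/lol_park_lulu | src/tier_adjust/vote_tier_adjust.py | _truncate_field_value
-- ===== SOURCE A (Python) =====
-- def _truncate_field_value(value: str, max_length: int = 1024) -> str:
--     if len(value) <= max_length:
--         return value
--
--     lines = value.split('\n')
--     result = ""
--
--     for i, line in enumerate(lines):
--         test_result = result + line + '\n'
--         if len(test_result) > max_length - 50:
--             remaining = len(lines) - i
--             result += f"\n... 그리고 {remaining}명 더"
--             break
--         result = test_result
--
--     return result.rstrip()
-- ===== SOURCE B (Python) =====
-- def _truncate_field_value(value: str, max_length: int = 1024) -> str: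
--     if len(value) <= max_length:
--         return value
--     # positions of the newline separators; keeping the first i lines costs nl[i-1] + 1 chars
--     nl = [j for j, ch in enumerate(value) if ch == '\n']
--     budget = max_length - 50
--     # binary search: i = number of newline positions j with j + 1 <= budget
--     lo, hi = 0, len(nl)
--     while lo < hi:
--         mid = (lo + hi) // 2
--         if nl[mid] + 1 <= budget:
--             lo = mid + 1
--         else:
--             hi = mid
--     head = value[:nl[lo - 1] + 1] if lo > 0 else ''
--     return head + f"\n... 그리고 {len(nl) - lo + 1}명 더"
-- ===== Notes on version B (the rewrite author's own statement) =====
-- stated objective: alternative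
-- what changed: A greedily re-concatenates the kept prefix line by line until the budget is exceeded and then rstrips; B never walks lines at all: it collects the newline positions of the raw string, binary-searches them for the number of leading lines whose cumulative cost fits max_length-50, and builds the answer with one character-level slice plus the marker.
import Mathlib
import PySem

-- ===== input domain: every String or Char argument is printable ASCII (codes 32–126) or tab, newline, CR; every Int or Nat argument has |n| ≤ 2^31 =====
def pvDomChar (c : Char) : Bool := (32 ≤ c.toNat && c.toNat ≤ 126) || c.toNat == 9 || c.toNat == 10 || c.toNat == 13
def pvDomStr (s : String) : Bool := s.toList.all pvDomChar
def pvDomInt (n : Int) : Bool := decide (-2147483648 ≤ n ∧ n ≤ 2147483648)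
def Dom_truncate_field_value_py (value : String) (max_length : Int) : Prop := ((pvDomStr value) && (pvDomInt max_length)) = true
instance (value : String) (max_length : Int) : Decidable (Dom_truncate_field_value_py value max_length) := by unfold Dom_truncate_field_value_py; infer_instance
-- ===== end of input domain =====

-- B replaces A's greedy line-by-line re-concatenation by indexing the newline positions of the raw
-- string, binary-searching them for the cut, and building the result with one slice; return values
-- proved equal on every input.

-- ===== PORT A =====
-- the for-loop over enumerate(lines): result accumulates the kept prefix, break appends the marker
def truncA_loop (lines : List (List Char)) (i : Nat) (nLines : Nat) (result : List Char) (max_length : Int) : List Char :=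
  match lines with
  | [] => result
  | l :: rest =>
    let test := result ++ l ++ ['\n']
    if (test.length : Int) > max_length - 50 then
      result ++ "\n... 그리고 ".toList ++ (PySem.Int.toStr ((nLines : Int) - (i : Int))).toList ++ "명 더".toList
    else truncA_loop rest (i + 1) nLines test max_length

def truncate_field_value_py (value : String) (max_length : Int) : String :=
  if PySem.Str.len value ≤ max_length then value
  else
    let lines := PySem.Chars.splitOn value.toList ['\n']
    String.ofList (PySem.Chars.rstrip (truncA_loop lines 0 lines.length [] max_length))

-- ===== PORT B =====
-- B's while-loop: binary search over the newline positions (nl[mid] always in range: lo < hi ≤ len nl)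
def truncB_bs (nl : List Int) (budget : Int) (lo hi : Nat) : Nat :=
  if h : lo < hi then
    let mid := (lo + hi) / 2
    if PySem.List.pyGetD nl (mid : Int) 0 + 1 ≤ budget then truncB_bs nl budget (mid + 1) hi
    else truncB_bs nl budget lo mid
  else lo
termination_by hi - lo
decreasing_by all_goals omega

def truncate_field_value_py_alt (value : String) (max_length : Int) : String :=
  if PySem.Str.len value ≤ max_length then value
  else
    let s := value.toList
    -- nl = [j for j, ch in enumerate(value) if ch == '\n']
    let nl := ((PySem.List.enumerate s 0).filter (fun p => p.2 == '\n')).map (·.1)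
    let i := truncB_bs nl (max_length - 50) 0 nl.length
    -- head = value[:nl[i-1] + 1] if i > 0 else ''  (nl[i-1] in range: 0 < i ≤ len nl)
    let head := if 0 < i then PySem.List.slice s none (some (PySem.List.pyGetD nl ((i : Int) - 1) 0 + 1)) else []
    String.ofList (head ++ "\n... 그리고 ".toList ++ (PySem.Int.toStr ((nl.length : Int) - (i : Int) + 1)).toList ++ "명 더".toList)

-- ===== PRECONDITION & SPEC =====
def Spec_truncate_field_value_py (value : String) (max_length : Int) (out : String) : Prop := out = truncate_field_value_py_alt value max_length
instance (value : String) (max_length : Int) (out : String) : Decidable (Spec_truncate_field_value_py value max_length out) := by unfold Spec_truncate_field_value_py; infer_instance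

-- ===== CLAIM (what is proved, stated in full; the proofs are below) =====
def Claim_equal_truncate_field_value_py : Prop := ∀ (value : String) (max_length : Int), Dom_truncate_field_value_py value max_length → Spec_truncate_field_value_py value max_length (truncate_field_value_py value max_length)

-- ===== LEMMAS AND PROOFS =====

-- reference split on '\n': pre is the current (partial) first piece
def splitNl (pre : List Char) : List Char → List (List Char)
  | [] => [pre]
  | c :: rest => if c = '\n' then pre :: splitNl [] rest else splitNl (pre ++ [c]) rest

-- each piece followed by '\n', concatenated
def catNl (ls : List (List Char)) : List Char := ls.flatMap (fun l => l ++ ['\n'])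

-- reference newline positions starting at absolute offset k
def nlp (k : Int) : List Char → List Int
  | [] => []
  | c :: rest => if c = '\n' then k :: nlp (k + 1) rest else nlp (k + 1) rest

-- prefix sums of the per-line costs (len + 1)
def cums : List (List Char) → List Int
  | [] => []
  | l :: ls => ((l.length : Int) + 1) :: (cums ls).map (· + ((l.length : Int) + 1))

-- greedy cut: how many leading lines fit the budget (proof-side model of A's break index)
def gcut (b : Int) : List (List Char) → Int → Nat
  | [], _ => 0
  | l :: rest, t =>
    if t + (l.length : Int) + 1 ≤ b then gcut b rest (t + (l.length : Int) + 1) + 1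
    else 0

-- length of the longest prefix of xs whose entries are ≤ b
def twl (b : Int) : List Int → Nat
  | [] => 0
  | x :: xs => if x ≤ b then twl b xs + 1 else 0

def sumCost (ls : List (List Char)) : Nat := (ls.map (fun l => l.length + 1)).sum

theorem splitOn_go_spec : ∀ (fuel : Nat) (l cur : List Char) (acc : List (List Char)), l.length ≤ fuel →
    PySem.Chars.splitOn.go ['\n'] fuel l cur acc = acc.reverse ++ splitNl cur.reverse l := by
  intro fuel
  induction fuel with
  | zero =>
    intro l cur acc h
    have hl : l = [] := by cases l <;> simp_all
    subst hl
    have hgo : PySem.Chars.splitOn.go ['\n'] 0 [] cur acc = ((cur.reverse ++ []) :: acc).reverse := rfl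
    rw [hgo]
    simp [splitNl]
  | succ n ih =>
    intro l cur acc h
    cases l with
    | nil =>
      have hgo : PySem.Chars.splitOn.go ['\n'] (n + 1) [] cur acc = (cur.reverse :: acc).reverse := rfl
      rw [hgo]
      simp [splitNl]
    | cons c rest =>
      have hgo : PySem.Chars.splitOn.go ['\n'] (n + 1) (c :: rest) cur acc
          = if ['\n'].isPrefixOf (c :: rest)
            then PySem.Chars.splitOn.go ['\n'] n (List.drop ['\n'].length (c :: rest)) [] (cur.reverse :: acc)
            else PySem.Chars.splitOn.go ['\n'] n rest (c :: cur) acc := rfl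
      rw [hgo]
      simp only [List.length_cons] at h
      by_cases hc : c = '\n'
      · subst hc
        rw [if_pos (by simp)]
        simp only [List.length_singleton, List.drop_one, List.tail_cons]
        rw [ih rest [] (cur.reverse :: acc) (by omega)]
        simp [splitNl]
      · rw [if_neg (by simp; exact fun e => hc e.symm)]
        rw [ih rest (c :: cur) acc (by omega)]
        simp [splitNl, hc]

theorem splitOn_eq_splitNl (s : List Char) : PySem.Chars.splitOn s ['\n'] = splitNl [] s := by
  rw [PySem.Chars.splitOn, splitOn_go_spec _ _ _ _ (by omega)]
  simp

theorem sumCost_splitNl : ∀ (l pre : List Char), sumCost (splitNl pre l) = pre.length + l.length + 1 := by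
  intro l
  induction l with
  | nil => intro pre; simp [splitNl, sumCost]
  | cons c rest ih =>
    intro pre
    by_cases hc : c = '\n'
    · simp only [splitNl, if_pos hc, sumCost, List.map_cons, List.sum_cons]
      have := ih []
      simp only [sumCost] at this
      simp only [this]
      simp
      omega
    · simp only [splitNl, if_neg hc]
      rw [ih (pre ++ [c])]
      simp
      omega

theorem splitNl_ne_nil (l pre : List Char) : splitNl pre l ≠ [] := by
  induction l generalizing pre with
  | nil => simp [splitNl]
  | cons c rest ih => by_cases hc : c = '\n' <;> simp [splitNl, hc, ih]

theorem gcut_le_length : ∀ (lines : List (List Char)) (b t : Int), gcut b lines t ≤ lines.length := by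
  intro lines
  induction lines with
  | nil => intro b t; simp [gcut]
  | cons l rest ih =>
    intro b t
    rw [gcut]
    split
    · have := ih b (t + (l.length : Int) + 1); simpa using this
    · simp

theorem gcut_full : ∀ (lines : List (List Char)) (b t : Int),
    gcut b lines t = lines.length → lines = [] ∨ t + (sumCost lines : Int) ≤ b := by
  intro lines
  induction lines with
  | nil => intro b t _; left; rfl
  | cons l rest ih =>
    intro b t h
    right
    rw [gcut] at h
    simp only [List.length_cons] at h
    split at h
    · rename_i hle
      have hr := ih b (t + (l.length : Int) + 1) (by omega)
      have hs : sumCost (l :: rest) = (l.length + 1) + sumCost rest := by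
        simp [sumCost]
      rcases hr with hr | hr
      · subst hr
        simp only [sumCost, List.map_nil, List.sum_nil] at hs ⊢
        rw [hs]
        push_cast
        omega
      · rw [hs]
        push_cast at hr ⊢
        omega
    · omega

theorem rstrip_append_nonspace (xs : List Char) (a : Char) (h : PySem.Chars.isspace a = false) :
    PySem.Chars.rstrip (xs ++ [a]) = xs ++ [a] := by
  simp [PySem.Chars.rstrip, h]

-- main loop invariant: A's loop result equals "kept prefix (of the greedy cut length) + marker",
-- or the full concatenation when no break happens
theorem loop_spec (ml : Int) : ∀ (lines : List (List Char)) (i0 N : Nat) (r : List Char),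
    truncA_loop lines i0 N r ml =
      if gcut (ml - 50) lines (r.length : Int) = lines.length
      then r ++ catNl lines
      else r ++ catNl (lines.take (gcut (ml - 50) lines (r.length : Int)))
             ++ "\n... 그리고 ".toList
             ++ (PySem.Int.toStr ((N : Int) - (i0 : Int) - (gcut (ml - 50) lines (r.length : Int) : Int))).toList
             ++ "명 더".toList := by
  intro lines
  induction lines with
  | nil => intro i0 N r; simp [truncA_loop, gcut, catNl]
  | cons l rest ih =>
    intro i0 N r
    have hlen : (((r ++ l ++ ['\n']).length : Nat) : Int) = (r.length : Int) + (l.length : Int) + 1 := by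
      simp only [List.length_append, List.length_cons, List.length_nil]
      push_cast
      ring
    rw [truncA_loop]
    rw [gcut]
    by_cases hle : (r.length : Int) + (l.length : Int) + 1 ≤ ml - 50
    · -- no break on this line
      rw [if_neg (by rw [hlen]; omega), if_pos hle]
      rw [ih (i0 + 1) N (r ++ l ++ ['\n'])]
      rw [hlen]
      set c := gcut (ml - 50) rest ((r.length : Int) + (l.length : Int) + 1) with hc
      have hcle := gcut_le_length rest (ml - 50) ((r.length : Int) + (l.length : Int) + 1)
      rw [← hc] at hcle
      by_cases hfull : c = rest.length
      · rw [if_pos hfull, if_pos (by simp [hfull])]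
        simp [catNl]
      · rw [if_neg hfull, if_neg (by simp only [List.length_cons]; omega)]
        have harith : ((N : Int) - ((i0 + 1 : Nat) : Int) - (c : Int)) = ((N : Int) - (i0 : Int) - ((c + 1 : Nat) : Int)) := by
          push_cast; ring
        rw [harith]
        simp [catNl]
    · -- break immediately: cut = 0
      rw [if_pos (by rw [hlen]; omega), if_neg hle]
      rw [if_neg (by simp)]
      simp [catNl]

-- length of the original string in terms of its split
theorem sumCost_splitOn (s : List Char) : sumCost (PySem.Chars.splitOn s ['\n']) = s.length + 1 := by
  rw [splitOn_eq_splitNl, sumCost_splitNl]; simp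

theorem splitOn_ne_nil (s : List Char) : PySem.Chars.splitOn s ['\n'] ≠ [] := by
  rw [splitOn_eq_splitNl]; exact splitNl_ne_nil s []

-- ===== B-side bridging lemmas =====

-- the enumerate/filter/map comprehension computes nlp
theorem enum_filter_eq_nlp : ∀ (s : List Char) (k : Int),
    ((PySem.List.enumerate s k).filter (fun p => p.2 == '\n')).map (·.1) = nlp k s := by
  intro s
  induction s with
  | nil => intro k; simp [PySem.List.enumerate_nil, nlp]
  | cons c rest ih =>
    intro k
    rw [PySem.List.enumerate_cons]
    by_cases hc : c = '\n' <;> simp [nlp, hc, ih]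

theorem nlp_shift : ∀ (s : List Char) (k : Int), nlp k s = (nlp 0 s).map (· + k) := by
  intro s
  induction s with
  | nil => intro k; simp [nlp]
  | cons c rest ih =>
    intro k
    by_cases hc : c = '\n'
    · simp only [nlp, if_pos hc, zero_add]
      rw [ih (k + 1), ih 1, List.map_cons, List.map_map]
      simp only [zero_add]
      congr 1
      apply List.map_congr_left
      intro x _
      simp only [Function.comp_apply]
      ring
    · simp only [nlp, if_neg hc, zero_add]
      rw [ih (k + 1), ih 1, List.map_map]
      apply List.map_congr_left
      intro x _
      simp only [Function.comp_apply]
      ring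

theorem nlp_mem_bounds : ∀ (s : List Char) (k x : Int), x ∈ nlp k s → k ≤ x ∧ x < k + s.length := by
  intro s
  induction s with
  | nil => intro k x hx; simp [nlp] at hx
  | cons c rest ih =>
    intro k x hx
    simp only [List.length_cons]
    by_cases hc : c = '\n'
    · simp only [nlp, if_pos hc, List.mem_cons] at hx
      rcases hx with rfl | hx
      · push_cast; omega
      · have := ih (k + 1) x hx; push_cast at this ⊢; omega
    · simp only [nlp, if_neg hc] at hx
      have := ih (k + 1) x hx; push_cast at this ⊢; omega

theorem nlp_pairwise (s : List Char) (k : Int) : (nlp k s).Pairwise (· < ·) := by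
  induction s generalizing k with
  | nil => simp [nlp]
  | cons c rest ih =>
    by_cases hc : c = '\n'
    · simp only [nlp, if_pos hc]
      refine List.Pairwise.cons ?_ (ih (k + 1))
      intro x hx
      have := nlp_mem_bounds rest (k + 1) x hx
      omega
    · simp only [nlp, if_neg hc]; exact ih (k + 1)

-- the prefix-sum list of the split equals the (shifted) newline positions plus the total
theorem cums_splitNl : ∀ (s pre : List Char),
    cums (splitNl pre s) = (nlp (pre.length : Int) s).map (· + 1) ++ [(pre.length : Int) + (s.length : Int) + 1] := by
  intro s
  induction s with
  | nil => intro pre; simp [splitNl, cums, nlp]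
  | cons c rest ih =>
    intro pre
    by_cases hc : c = '\n'
    · simp only [splitNl, cums, nlp, if_pos hc]
      rw [ih []]
      rw [nlp_shift rest ((pre.length : Int) + 1)]
      simp only [List.length_nil, Nat.cast_zero, zero_add, List.map_append, List.map_map,
        List.map_cons, List.map_nil, List.length_cons]
      congr 1
      congr 1
      · apply List.map_congr_left
        intro x _
        simp only [Function.comp_apply]
        ring
      · congr 1
        push_cast
        ring
    · simp only [splitNl, if_neg hc]
      rw [ih (pre ++ [c])]
      have hlen : (((pre ++ [c]).length : Nat) : Int) = (pre.length : Int) + 1 := by simp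
      rw [hlen]
      simp only [nlp, if_neg hc, List.length_cons]
      congr 2
      push_cast
      ring

theorem cums_length : ∀ (ls : List (List Char)), (cums ls).length = ls.length := by
  intro ls
  induction ls with
  | nil => simp [cums]
  | cons l rest ih => simp [cums, ih]

theorem cums_getElem : ∀ (ls : List (List Char)) (i : Nat) (h : i < ls.length),
    (cums ls)[i]'(by rw [cums_length]; exact h) = ((catNl (ls.take (i + 1))).length : Int) := by
  intro ls
  induction ls with
  | nil => intro i h; simp at h
  | cons l rest ih =>
    intro i h
    cases i with
    | zero => simp [cums, catNl]
    | succ j =>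
      simp only [List.length_cons] at h
      have hj : j < rest.length := by omega
      simp only [cums, List.getElem_cons_succ]
      rw [List.getElem_map]
      rw [ih j hj]
      simp only [catNl, List.take_succ_cons, List.flatMap_cons, List.length_append,
        List.length_cons, List.length_nil]
      push_cast
      ring

-- greedy cut through the prefix sums
theorem twl_map_add : ∀ (xs : List Int) (a b : Int), twl b (xs.map (· + a)) = twl (b - a) xs := by
  intro xs
  induction xs with
  | nil => intro a b; simp [twl]
  | cons x t ih =>
    intro a b
    simp only [List.map_cons, twl]
    by_cases hx : x + a ≤ b
    · rw [if_pos hx, if_pos (by omega), ih]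
    · rw [if_neg hx, if_neg (by omega)]

theorem gcut_eq_twl : ∀ (ls : List (List Char)) (b t : Int), gcut b ls t = twl (b - t) (cums ls) := by
  intro ls
  induction ls with
  | nil => intro b t; simp [gcut, cums, twl]
  | cons l rest ih =>
    intro b t
    simp only [gcut, cums, twl]
    by_cases hle : t + (l.length : Int) + 1 ≤ b
    · rw [if_pos hle, if_pos (by omega), ih, twl_map_add]
      congr 1
      ring
    · rw [if_neg hle, if_neg (by omega)]

theorem twl_append_single_fail (xs : List Int) (x b : Int) (h : ¬ x ≤ b) :
    twl b (xs ++ [x]) = twl b xs := by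
  induction xs with
  | nil => simp [twl, h]
  | cons y t ih =>
    simp only [List.cons_append, twl]
    by_cases hy : y ≤ b
    · rw [if_pos hy, if_pos hy, ih]
    · rw [if_neg hy, if_neg hy]

theorem twl_le_length (b : Int) (xs : List Int) : twl b xs ≤ xs.length := by
  induction xs with
  | nil => simp [twl]
  | cons x t ih =>
    simp only [twl, List.length_cons]
    split
    · omega
    · omega

-- twl is the unique split point of a threshold predicate
theorem twl_eq_of_split : ∀ (xs : List Int) (b : Int) (i : Nat), i ≤ xs.length →
    (∀ k, k < i → xs.getD k 0 ≤ b) → (∀ k, i ≤ k → k < xs.length → ¬ xs.getD k 0 ≤ b) →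
    twl b xs = i := by
  intro xs
  induction xs with
  | nil => intro b i h _ _; simp at h; simp [twl, h]
  | cons x t ih =>
    intro b i hle hlo hhi
    cases i with
    | zero =>
      have hx := hhi 0 (by omega) (by simp)
      simp only [twl]
      rw [if_neg (by simpa using hx)]
    | succ j =>
      have hx := hlo 0 (by omega)
      simp only [twl]
      rw [if_pos (by simpa using hx)]
      have := ih b j (by simpa using hle)
        (fun k hk => by have := hlo (k + 1) (by omega); simpa using this)
        (fun k hk1 hk2 => by
          have := hhi (k + 1) (by omega) (by simp; omega)
          simpa using this)
      omega

-- binary search computes twl on a strictly increasing list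
theorem bs_spec : ∀ (nl : List Int) (b : Int) (lo hi : Nat), nl.Pairwise (· < ·) →
    lo ≤ hi → hi ≤ nl.length →
    (∀ k, k < lo → nl.getD k 0 + 1 ≤ b) →
    (∀ k, hi ≤ k → k < nl.length → ¬ nl.getD k 0 + 1 ≤ b) →
    truncB_bs nl b lo hi = twl (b - 1) nl := by
  intro nl b lo hi hp hlh hhl hlo hhi
  induction lo, hi using truncB_bs.induct nl b with
  | case1 lo hi h mid htest ih =>
    rw [truncB_bs, dif_pos h, if_pos (by simpa [mid] using htest)]
    refine ih ?_ ?_ ?_ hhi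
    · omega
    · omega
    · intro k hk
      have hmidlt : mid < nl.length := by omega
      by_cases hkm : k = mid
      · subst hkm
        simpa [PySem.List.pyGetD_natCast, List.getD_eq_getElem?_getD, List.getElem?_eq_getElem hmidlt] using htest
      · have hklt : k < mid := by omega
        have hkl : k < nl.length := by omega
        have hmono := (List.pairwise_iff_getElem.mp hp) k mid hkl hmidlt hklt
        have hmid : PySem.List.pyGetD nl (mid : Int) 0 = nl[mid] := by
          simp [PySem.List.pyGetD_natCast, List.getD_eq_getElem?_getD, List.getElem?_eq_getElem hmidlt]
        rw [hmid] at htest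
        have : nl.getD k 0 = nl[k] := by
          simp [List.getD_eq_getElem?_getD, List.getElem?_eq_getElem hkl]
        rw [this]
        omega
  | case2 lo hi h mid htest ih =>
    rw [truncB_bs, dif_pos h, if_neg (by simpa [mid] using htest)]
    refine ih ?_ ?_ hlo ?_
    · omega
    · omega
    · intro k hk hkl
      have hmidlt : mid < nl.length := by omega
      have hmid : PySem.List.pyGetD nl (mid : Int) 0 = nl[mid] := by
        simp [PySem.List.pyGetD_natCast, List.getD_eq_getElem?_getD, List.getElem?_eq_getElem hmidlt]
      rw [hmid] at htest
      by_cases hkm : k = mid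
      · subst hkm
        simp [List.getD_eq_getElem?_getD, List.getElem?_eq_getElem hkl]
        omega
      · have hklt : mid < k := by omega
        have hmono := (List.pairwise_iff_getElem.mp hp) mid k hmidlt hkl hklt
        have : nl.getD k 0 = nl[k] := by
          simp [List.getD_eq_getElem?_getD, List.getElem?_eq_getElem hkl]
        rw [this]
        omega
  | case3 lo hi h =>
    have hle : lo = hi := by omega
    subst hle
    rw [truncB_bs, dif_neg h]
    refine (twl_eq_of_split nl (b - 1) lo hhl
      (fun k hk => by have := hlo k hk; omega)
      (fun k hk1 hk2 => by have := hhi k hk1 hk2; omega)).symm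

theorem catNl_cons (l : List Char) (ls : List (List Char)) :
    catNl (l :: ls) = l ++ ['\n'] ++ catNl ls := by
  simp [catNl]

-- catNl of a split is the string plus a final newline
theorem catNl_splitNl : ∀ (s pre : List Char), catNl (splitNl pre s) = pre ++ s ++ ['\n'] := by
  intro s
  induction s with
  | nil => intro pre; simp [splitNl, catNl]
  | cons c rest ih =>
    intro pre
    by_cases hc : c = '\n'
    · subst hc
      simp only [splitNl, if_true]
      rw [catNl_cons, ih []]
      simp
    · simp only [splitNl, if_neg hc]
      rw [ih (pre ++ [c])]
      simp

theorem catNl_append (a b : List (List Char)) : catNl (a ++ b) = catNl a ++ catNl b := by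
  simp [catNl]

-- ===== VERDICT (by name: the statement is the Claim_ definition above) =====
theorem truncate_field_value_py_spec : Claim_equal_truncate_field_value_py := by
  intro value max_length _
  unfold Spec_truncate_field_value_py truncate_field_value_py truncate_field_value_py_alt
  by_cases h : PySem.Str.len value ≤ max_length
  · rw [if_pos h, if_pos h]
  · rw [if_neg h, if_neg h]
    simp only []
    set s := value.toList with hs
    set lines := PySem.Chars.splitOn s ['\n'] with hlines
    set nl := ((PySem.List.enumerate s 0).filter (fun p => p.2 == '\n')).map (·.1) with hnl
    have hnlp : nl = nlp 0 s := enum_filter_eq_nlp s 0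
    have hlenv : PySem.Str.len value = (s.length : Int) := by simp [PySem.Str.len, hs]
    have hbig : max_length < (s.length : Int) := by rw [hlenv] at h; omega
    set b := max_length - 50 with hb
    -- the prefix-sum list of the split
    have hcums : cums lines = nl.map (· + 1) ++ [(s.length : Int) + 1] := by
      rw [hlines, splitOn_eq_splitNl, cums_splitNl s [], hnlp]
      simp
    have hlinlen : lines.length = nl.length + 1 := by
      rw [← cums_length lines, hcums]
      simp
    -- the greedy cut equals the binary-search result
    set c := gcut b lines 0 with hc
    set i := truncB_bs nl b 0 nl.length with hi
    have hci : c = i := by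
      rw [hc, hi, gcut_eq_twl, hcums, sub_zero,
        twl_append_single_fail _ _ _ (by omega), twl_map_add]
      rw [bs_spec nl b 0 nl.length (hnlp ▸ nlp_pairwise s 0) (by omega) (by omega)
        (by intro k hk; omega) (by intro k hk1 hk2; omega)]
    -- A's loop always breaks
    have hnotfull : c ≠ lines.length := by
      intro hfull
      rcases gcut_full lines b 0 hfull with hnil | hsum
      · exact splitOn_ne_nil s hnil
      · have hsc : sumCost lines = s.length + 1 := sumCost_splitOn s
        rw [hsc] at hsum
        push_cast at hsum
        omega
    have hlsp := loop_spec max_length lines 0 lines.length []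
    simp only [List.length_nil, Nat.cast_zero, ← hb, ← hc] at hlsp
    rw [if_neg hnotfull] at hlsp
    rw [hlsp]
    refine congrArg String.ofList ?_
    rw [List.nil_append]
    -- the rstrip is a no-op: the marker ends with a non-space character
    have hmark : ∀ (pre : List Char) (m : Int),
        pre ++ "\n... 그리고 ".toList ++ (PySem.Int.toStr m).toList ++ "명 더".toList
        = (pre ++ "\n... 그리고 ".toList ++ (PySem.Int.toStr m).toList ++ ['명', ' ']) ++ ['더'] := by
      intro pre m
      have h2 : ("명 더".toList : List Char) = ['명', ' ', '더'] := by decide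
      rw [h2]
      simp
    rw [hmark, rstrip_append_nonspace _ _ (by decide), ← hmark]
    have hcnt : (lines.length : Int) - 0 - (c : Int) = (nl.length : Int) - (i : Int) + 1 := by
      rw [hci, hlinlen]; push_cast; ring
    rw [hcnt, hci]
    congr 2
    -- the kept prefix equals B's character-level slice
    have hile : i ≤ nl.length := by
      rw [hi, bs_spec nl b 0 nl.length (hnlp ▸ nlp_pairwise s 0) (by omega) (by omega)
        (by intro k hk; omega) (by intro k hk1 hk2; omega)]
      exact twl_le_length _ _
    by_cases hzero : 0 < i
    · rw [if_pos hzero]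
      have hidx : i - 1 < nl.length := by omega
      have hcast : ((i : Nat) : Int) - 1 = (((i - 1 : Nat) : Nat) : Int) := by omega
      rw [hcast, PySem.List.pyGetD_natCast, List.getD_eq_getElem?_getD,
        List.getElem?_eq_getElem hidx]
      simp only [Option.getD_some]
      have hmem : nl[i - 1] ∈ nlp 0 s := by rw [← hnlp]; exact List.getElem_mem hidx
      have hbounds := nlp_mem_bounds s 0 _ hmem
      -- length of the kept prefix
      have hidx' : i - 1 < lines.length := by omega
      have hP := cums_getElem lines (i - 1) hidx'
      have hval : (cums lines)[i - 1]'(by rw [cums_length]; exact hidx') = nl[i - 1] + 1 := by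
        simp only [hcums]
        rw [List.getElem_append_left (by simpa using hidx)]
        simp
      rw [hval] at hP
      have htake : i - 1 + 1 = i := by omega
      rw [htake] at hP
      set P := (catNl (lines.take i)).length with hPdef
      have hPle : P ≤ s.length := by omega
      rw [PySem.List.slice_to (hb := by omega)]
      have htoNat : (nl[i - 1] + 1).toNat = P := by omega
      rw [htoNat]
      have hsplit : catNl (lines.take i) ++ catNl (lines.drop i) = s ++ ['\n'] := by
        rw [← catNl_append, List.take_append_drop, hlines, splitOn_eq_splitNl, catNl_splitNl]
        simp
      have : (s ++ ['\n']).take P = s.take P := by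
        rw [List.take_append]
        have : P - s.length = 0 := by omega
        rw [this]
        simp
      rw [← this, ← hsplit, List.take_left' rfl]
    · rw [if_neg hzero]
      have hc0 : i = 0 := by omega
      rw [hc0]
      simp [catNl]
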